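-- pv_equiv track=rewrite | github.com/izunori/algo_for_competition | algo_arith.py | powMemo
-- ===== SOURCE A (Python) =====
-- def powMemo(N,M,MOD):
--     memo = [[0]*(M+1) for i in range(N+1)]
--     for n in range(1,N+1):
--         t = 1
--         memo[n][0] = t
--         for m in range(1,M+1):
--             t = (t*n)%MOD
--             memo[n][m] = t
--     memo[0][0] = 1
--     return memo
-- ===== SOURCE B (Python) =====
-- def powMemo(N, M, MOD):
--     # Each entry computed directly by built-in modular exponentiation;
--     # column 0 is the literal 1 (A stores an unmodded 1 there).
--     return [[1] + [pow(n, m, MOD) for m in range(1, M + 1)] for n in range(N + 1)]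
-- ===== Notes on version B (the rewrite author's own statement) =====
-- stated objective: idiomatic
-- what changed: Replaces the pre-allocated zero table mutated in place by an incremental running product with a nested comprehension whose entries are computed independently by built-in modular exponentiation pow(n, m, MOD).
-- outside the precondition, e.g. on powMemo(0, 1, 0): A returns [[1, 0]], B raises ValueError
import Mathlib
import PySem

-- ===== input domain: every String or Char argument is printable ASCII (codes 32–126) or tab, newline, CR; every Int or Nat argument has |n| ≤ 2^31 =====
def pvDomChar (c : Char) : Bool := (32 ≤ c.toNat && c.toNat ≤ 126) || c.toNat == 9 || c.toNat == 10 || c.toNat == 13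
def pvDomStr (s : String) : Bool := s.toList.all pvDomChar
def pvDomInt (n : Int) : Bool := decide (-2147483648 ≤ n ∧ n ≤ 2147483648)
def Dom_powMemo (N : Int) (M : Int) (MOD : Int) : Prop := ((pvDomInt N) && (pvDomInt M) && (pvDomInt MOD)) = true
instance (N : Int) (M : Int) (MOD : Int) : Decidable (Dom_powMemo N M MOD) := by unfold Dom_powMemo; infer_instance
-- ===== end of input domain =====

-- B computes each table entry independently with built-in modular exponentiation
-- (idiomatic comprehension) instead of A's in-place table mutated by a running product.

-- ===== PORT A =====
-- inner loop body: t = (t*n)%MOD; memo[n][m] = t   (state = (t, row))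
def pvStepA (n MOD : Int) (st : Int × List Int) (m : Int) : Int × List Int :=
  let t := PySem.Int.mod (st.1 * n) MOD
  (t, PySem.List.pySetD st.2 m t)

-- one iteration of 'for n in range(1, N+1)'
def pvOuterA (M MOD : Int) (memo : List (List Int)) (n : Int) : List (List Int) :=
  -- t = 1; memo[n][0] = t; then the inner loop, then write the row back
  PySem.List.pySetD memo n
    (((PySem.List.pyRange 1 (M + 1) 1).foldl (pvStepA n MOD)
        (1, PySem.List.pySetD (PySem.List.pyGetD memo n []) 0 1)).2)

def powMemo (N : Int) (M : Int) (MOD : Int) : List (List Int) :=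
  -- memo = [[0]*(M+1) for i in range(N+1)]   ([0]*k is [] for k ≤ 0, i.e. replicate k.toNat)
  let memo := (PySem.List.pyRange 0 (N + 1) 1).map (fun _ => List.replicate (M + 1).toNat (0 : Int))
  let memo := (PySem.List.pyRange 1 (N + 1) 1).foldl (pvOuterA M MOD) memo
  -- memo[0][0] = 1
  PySem.List.pySetD memo 0 (PySem.List.pySetD (PySem.List.pyGetD memo 0 []) 0 1)

-- ===== PORT B =====
-- one row: [1] + [pow(n, m, MOD) for m in range(1, M+1)]
def pvRowB (M MOD : Int) (n : Int) : List Int :=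
  1 :: (PySem.List.pyRange 1 (M + 1) 1).map (fun m => PySem.Int.powMod n m.toNat MOD)

def powMemo_alt (N : Int) (M : Int) (MOD : Int) : List (List Int) :=
  (PySem.List.pyRange 0 (N + 1) 1).map (pvRowB M MOD)

-- ===== PRECONDITION & SPEC =====
-- Pre_ excludes negative N or M (A raises IndexError on memo[0][0] or memo[n][0]) and
-- MOD = 0 with M ≥ 1 (A raises ZeroDivisionError when N ≥ 1, and when N = 0 A returns
-- a value while B's pow(0, m, 0) raises ValueError).
def Pre_powMemo (N : Int) (M : Int) (MOD : Int) : Prop :=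
  0 ≤ N ∧ 0 ≤ M ∧ (MOD ≠ 0 ∨ M = 0)
instance (N : Int) (M : Int) (MOD : Int) : Decidable (Pre_powMemo N M MOD) := by
  unfold Pre_powMemo; infer_instance

def pvWitness_powMemo : Int × Int × Int := (2, 3, 5)

def Spec_powMemo (N : Int) (M : Int) (MOD : Int) (out : List (List Int)) : Prop := out = powMemo_alt N M MOD
instance (N : Int) (M : Int) (MOD : Int) (out : List (List Int)) : Decidable (Spec_powMemo N M MOD out) := by unfold Spec_powMemo; infer_instance

-- ===== CLAIM (what is proved, stated in full; the proofs are below) =====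
def Claim_equal_powMemo : Prop := ∀ (N : Int) (M : Int) (MOD : Int), Dom_powMemo N M MOD → Pre_powMemo N M MOD → Spec_powMemo N M MOD (powMemo N M MOD)

-- ===== LEMMAS AND PROOFS =====

-- (a % m * c) % m = (a * c) % m for Python's floor mod, every m (fmod a 0 = a)
lemma pvFmod_absorb (a c m : Int) : ((a.fmod m) * c).fmod m = (a * c).fmod m := by
  have h : (a.fmod m) * c = a * c + m * (-(a.fdiv m) * c) := by
    rw [Int.fmod_def]; ring
  rw [h, Int.add_mul_fmod_self_left]

-- setting position 1+b of r0 :: (mapb ++ z :: extra), where mapb has length b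
lemma pvSet_at (r0 z v : Int) (mapb extra : List Int) (hb : mapb.length = b) :
    PySem.List.pySetD (r0 :: (mapb ++ z :: extra)) (1 + (b : Int)) v
      = r0 :: (mapb ++ v :: extra) := by
  have h1 : (1 : Int) + (b : Int) = ((1 + b : Nat) : Int) := by push_cast; ring
  rw [h1, PySem.List.pySetD_natCast, Nat.add_comm 1 b, List.set_cons_succ,
    List.set_append_right b v (by omega)]
  simp [hb]

-- the completed row that A's inner loop produces for row index n
def pvFRow (MOD : Int) (b : Nat) (n : Int) : List Int :=
  1 :: (List.range b).map (fun (j : Nat) => (n ^ (j + 1)).fmod MOD)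

lemma pvInner_eq (n MOD : Int) (b : Nat) (r0 : Int) :
    ∀ (extra : List Int),
      (List.range b).foldl (fun st (k : Nat) => pvStepA n MOD st (1 + (k : Int)))
          (1, r0 :: (List.replicate b (0 : Int) ++ extra))
        = ((if b = 0 then (1 : Int) else (n ^ b).fmod MOD),
           r0 :: ((List.range b).map (fun (k : Nat) => (n ^ (k + 1)).fmod MOD) ++ extra)) := by
  induction b with
  | zero => intro extra; simp
  | succ b ih =>
    intro extra
    rw [List.range_succ, List.foldl_append]
    have hrep : List.replicate (b + 1) (0 : Int) ++ extra
        = List.replicate b (0 : Int) ++ ((0 : Int) :: extra) := by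
      rw [List.replicate_succ']; simp
    rw [hrep, ih]
    simp only [List.foldl_cons, List.foldl_nil, pvStepA]
    rw [show ∀ x : Int, PySem.Int.mod x MOD = x.fmod MOD from fun _ => rfl]
    rw [pvSet_at _ _ _ _ _ (by simp)]
    have ht : (((if b = 0 then (1 : Int) else (n ^ b).fmod MOD)) * n).fmod MOD
        = (n ^ (b + 1)).fmod MOD := by
      by_cases hb : b = 0
      · subst hb; norm_num
      · rw [if_neg hb, pvFmod_absorb]
        ring_nf
    rw [ht]
    simp

def pvZRow (b : Nat) : List Int := List.replicate (b + 1) (0 : Int)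

-- setting row 1+a of z :: (rows ++ z :: extra), where rows has length a (list-of-rows version)
lemma pvSetRow_at (z v : List Int) (rows extra : List (List Int)) (ha : rows.length = a) :
    PySem.List.pySetD (z :: (rows ++ z :: extra)) (1 + (a : Int)) v
      = z :: (rows ++ v :: extra) := by
  have h1 : (1 : Int) + (a : Int) = ((1 + a : Nat) : Int) := by push_cast; ring
  rw [h1, PySem.List.pySetD_natCast, Nat.add_comm 1 a, List.set_cons_succ,
    List.set_append_right a v (by omega)]
  simp [ha]

lemma pvOuter_eq (MOD : Int) (b : Nat) (a : Nat) :
    ∀ (extra : List (List Int)),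
      (List.range a).foldl (fun memo (k : Nat) => pvOuterA (b : Int) MOD memo (1 + (k : Int)))
          (pvZRow b :: (List.replicate a (pvZRow b) ++ extra))
        = pvZRow b :: ((List.range a).map (fun (k : Nat) => pvFRow MOD b (1 + (k : Int))) ++ extra) := by
  induction a with
  | zero => intro extra; simp
  | succ a ih =>
    intro extra
    rw [List.range_succ, List.foldl_append]
    have hrep : List.replicate (a + 1) (pvZRow b) ++ extra
        = List.replicate a (pvZRow b) ++ (pvZRow b :: extra) := by
      rw [List.replicate_succ']; simp
    rw [hrep, ih]
    simp only [List.foldl_cons, List.foldl_nil, pvOuterA]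
    -- the row fetched is still the untouched zero row
    have hget : PySem.List.pyGetD
        (pvZRow b :: ((List.range a).map (fun (k : Nat) => pvFRow MOD b (1 + (k : Int))) ++ pvZRow b :: extra))
        (1 + (a : Int)) ([] : List Int) = pvZRow b := by
      have h1 : (1 : Int) + (a : Int) = ((1 + a : Nat) : Int) := by push_cast; ring
      rw [h1, PySem.List.pyGetD_natCast]
      have h2 : (1 + a : Nat) = ((List.range a).map (fun (k : Nat) => pvFRow MOD b (1 + (k : Int)))).length + 1 := by
        simp; omega
      simp only [List.getD, h2]
      rw [List.getElem?_cons_succ, List.getElem?_append_right (by omega)]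
      simp
    rw [hget]
    have hrow0 : PySem.List.pySetD (pvZRow b) 0 1 = (1 : Int) :: List.replicate b 0 := by
      unfold pvZRow
      rw [List.replicate_succ]
      simp [pysem]
    rw [hrow0]
    -- inner loop
    have hrange : PySem.List.pyRange 1 ((b : Int) + 1) 1
        = (List.range b).map (fun (k : Nat) => (1 : Int) + (k : Int)) := by
      have h : ((b : Int) + 1 - 1).toNat = b := by omega
      rw [PySem.List.pyRange_one, h]
    rw [hrange, List.foldl_map]
    rw [show ((1 : Int) :: List.replicate b 0) = (1 : Int) :: (List.replicate b (0 : Int) ++ []) by simp,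
      pvInner_eq (1 + (a : Int)) MOD b 1 []]
    simp only [List.append_nil]
    rw [pvSetRow_at _ _ _ _ (by simp)]
    simp [pvFRow]

lemma pvRowB_eq (MOD : Int) (b : Nat) (n : Int) :
    pvRowB (b : Int) MOD n = pvFRow MOD b n := by
  unfold pvRowB pvFRow
  have hrange : PySem.List.pyRange 1 ((b : Int) + 1) 1
      = (List.range b).map (fun (k : Nat) => (1 : Int) + (k : Int)) := by
    have h : ((b : Int) + 1 - 1).toNat = b := by omega
    rw [PySem.List.pyRange_one, h]
  rw [hrange, List.map_map]
  refine congrArg (List.cons 1) (List.map_congr_left ?_)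
  intro j _
  simp only [Function.comp, PySem.Int.powMod_eq]
  have h1 : ((1 : Int) + (j : Int)).toNat = j + 1 := by omega
  rw [h1]
  rfl

-- ===== VERDICT (by name: the statement is the Claim_ definition above) =====
theorem powMemo_spec : Claim_equal_powMemo := by
  intro N M MOD _ hPre
  obtain ⟨hN, hM, -⟩ := hPre
  unfold Spec_powMemo
  lift N to ℕ using hN with a
  lift M to ℕ using hM with b
  simp only [powMemo, powMemo_alt]
  -- initial table
  have hr0 : PySem.List.pyRange 0 ((a : Int) + 1) 1
      = (List.range (a + 1)).map (fun (k : Nat) => ((k : Nat) : Int)) := by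
    rw [PySem.List.pyRange_one]
    have h : (((a : Int) + 1) - 0).toNat = a + 1 := by omega
    rw [h]
    simp
  have hlen : ((b : Int) + 1).toNat = b + 1 := by omega
  rw [hr0, hlen]
  have hinit : (List.range (a + 1)).map
      (fun _ : Nat => List.replicate (b + 1) (0 : Int))
      = pvZRow b :: (List.replicate a (pvZRow b) ++ []) := by
    rw [List.map_const']
    simp [pvZRow, List.replicate_succ]
  rw [List.map_map]
  rw [show ((fun _ : Int => List.replicate (b + 1) (0 : Int)) ∘ (fun (k : Nat) => ((k : Nat) : Int)))
        = (fun _ : Nat => List.replicate (b + 1) (0 : Int)) from rfl]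
  rw [hinit]
  -- the outer loop
  have hr1 : PySem.List.pyRange 1 ((a : Int) + 1) 1
      = (List.range a).map (fun (k : Nat) => (1 : Int) + (k : Int)) := by
    have h : ((a : Int) + 1 - 1).toNat = a := by omega
    rw [PySem.List.pyRange_one, h]
  rw [hr1, List.foldl_map, pvOuter_eq]
  -- memo[0][0] = 1
  rw [PySem.List.pyGetD_zero_cons]
  have hrow0 : PySem.List.pySetD (pvZRow b) 0 1 = (1 : Int) :: List.replicate b 0 := by
    unfold pvZRow
    rw [List.replicate_succ]
    simp [pysem]
  rw [hrow0]
  have hset0 : ∀ (v : List Int) (rows : List (List Int)),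
      PySem.List.pySetD (pvZRow b :: rows) 0 v = v :: rows := by
    intro v rows
    simp [pysem]
  rw [hset0]
  -- B side
  rw [List.range_succ_eq_map, List.map_cons, List.map_map]
  simp only [Function.comp_def]
  congr 1
  · -- row 0
    rw [show ((0 : Nat) : Int) = (0 : Int) from rfl, pvRowB_eq MOD b 0]
    unfold pvFRow
    congr 1
    simp
  · -- rows 1..a
    simp only [List.append_nil]
    rw [List.map_map]
    apply List.map_congr_left
    intro k _
    simp only [Function.comp_def]
    rw [pvRowB_eq MOD b]
    congr 1
    push_cast
    ring
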